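-- pv_equiv track=rewrite | github.com/jackdlogan/steam-cs2-highlight-extractor | steam_highlight_extractor.py | _group_events_into_segments
-- ===== SOURCE A (Python) =====
-- def _group_events_into_segments(events, threshold):
--     """
--     Split a sorted list of events into segments where the gap between
--     consecutive events exceeds `threshold` seconds.
--     Returns a list of lists (each inner list is one segment of events).
--     """
--     if not events or threshold <= 0:
--         return [events]
--     segments, current = [], [events[0]]
--     for e in events[1:]:
--         if e["time_sec"] - current[-1]["time_sec"] > threshold:
--             segments.append(current)
--             current = [e]
--         else:
--             current.append(e)
--     segments.append(current)
--     return segments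
-- ===== SOURCE B (Python) =====
-- def _group_events_into_segments(events, threshold):
--     """
--     Split a sorted list of events into segments where the gap between
--     consecutive events exceeds `threshold` seconds.
--     Right-to-left re-implementation: walk the adjacent pairs backwards,
--     prepending each event either to the first segment or as a new segment.
--     """
--     if not events or threshold <= 0:
--         return [events]
--     segments = [[events[-1]]]
--     for prev, cur in zip(reversed(events[:-1]), reversed(events[1:])):
--         if cur["time_sec"] - prev["time_sec"] > threshold:
--             segments.insert(0, [prev])
--         else:
--             segments[0].insert(0, prev)
--     return segments
-- ===== Notes on version B (the rewrite author's own statement) =====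
-- stated objective: alternative
-- what changed: B walks the adjacent event pairs right-to-left, prepending each event either as a new front segment or onto the current front segment, instead of A's left-to-right scan that flushes a separate 'current' accumulator at each gap.
import Mathlib
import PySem

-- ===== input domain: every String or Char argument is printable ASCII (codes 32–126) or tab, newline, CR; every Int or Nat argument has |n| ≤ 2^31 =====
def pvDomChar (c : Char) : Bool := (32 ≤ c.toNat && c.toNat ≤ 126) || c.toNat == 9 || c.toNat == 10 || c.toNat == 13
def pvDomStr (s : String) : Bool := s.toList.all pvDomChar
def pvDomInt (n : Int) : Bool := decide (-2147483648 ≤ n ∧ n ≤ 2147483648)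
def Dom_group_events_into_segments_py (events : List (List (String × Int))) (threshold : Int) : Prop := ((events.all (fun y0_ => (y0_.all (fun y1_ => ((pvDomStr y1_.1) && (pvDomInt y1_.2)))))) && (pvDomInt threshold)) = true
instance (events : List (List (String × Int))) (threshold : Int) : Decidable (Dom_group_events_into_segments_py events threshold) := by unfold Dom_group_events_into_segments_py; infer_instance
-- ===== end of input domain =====

-- B re-groups the events by walking the adjacent pairs RIGHT-TO-LEFT, prepending to the
-- segment list, instead of A's left-to-right scan with a flushed `current` accumulator;
-- objective: alternative (same linear pass count, opposite traversal direction).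

-- ===== PORT A =====
-- e["time_sec"]  (KeyError excluded by Pre_; default never observed inside Pre_)
def pvTime (e : List (String × Int)) : Int := ((PySem.Dict.mk e).get? "time_sec").getD 0

-- the for-loop of A: state = (segments, current); current is never empty, so
-- current[-1] (pyGetD … (-1) …) never hits its default.
def pvLoopA (threshold : Int) (segments : List (List (List (String × Int)))) (current : List (List (String × Int))) : List (List (String × Int)) → List (List (List (String × Int)))
  | [] => segments ++ [current]
  | e :: rest =>
    if pvTime e - pvTime (PySem.List.pyGetD current (-1) []) > threshold then
      pvLoopA threshold (segments ++ [current]) [e] rest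
    else
      pvLoopA threshold segments (current ++ [e]) rest

def group_events_into_segments_py (events : List (List (String × Int))) (threshold : Int) : List (List (List (String × Int))) :=
  if events = [] ∨ threshold ≤ 0 then [events]
  else
    match events with
    | [] => [events]
    | e0 :: rest => pvLoopA threshold [] [e0] rest

-- ===== PORT B =====
-- one loop iteration of B on the pair (prev, cur)
def pvStepB (threshold : Int) (segments : List (List (List (String × Int)))) (pc : List (String × Int) × List (String × Int)) : List (List (List (String × Int))) :=
  if pvTime pc.2 - pvTime pc.1 > threshold then
    [pc.1] :: segments                       -- segments.insert(0, [prev])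
  else
    match segments with                      -- segments[0].insert(0, prev)
    | s :: ss => (pc.1 :: s) :: ss
    | [] => [[pc.1]]                         -- unreachable: segments starts nonempty

def pvLoopB (threshold : Int) (segments : List (List (List (String × Int)))) : List ((List (String × Int)) × (List (String × Int))) → List (List (List (String × Int)))
  | [] => segments
  | pc :: rest => pvLoopB threshold (pvStepB threshold segments pc) rest

def group_events_into_segments_py_alt (events : List (List (String × Int))) (threshold : Int) : List (List (List (String × Int))) :=
  if events = [] ∨ threshold ≤ 0 then [events]
  else
    -- zip(reversed(events[:-1]), reversed(events[1:])), starting from [[events[-1]]]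
    pvLoopB threshold [[PySem.List.pyGetD events (-1) []]]
      (((PySem.List.slice events none (some (-1))).reverse).zip ((PySem.List.slice events (some 1) none).reverse))

-- ===== PRECONDITION & SPEC =====
-- Pre_ excludes exactly the inputs where Python A raises KeyError: threshold > 0,
-- at least two events, and some event dict lacking the key "time_sec".
def Pre_group_events_into_segments_py (events : List (List (String × Int))) (threshold : Int) : Prop :=
  threshold ≤ 0 ∨ events.length ≤ 1 ∨ (events.all (fun e => (PySem.Dict.mk e).contains "time_sec")) = true
instance (events : List (List (String × Int))) (threshold : Int) : Decidable (Pre_group_events_into_segments_py events threshold) := by unfold Pre_group_events_into_segments_py; infer_instance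

def pvWitness_group_events_into_segments_py : (List (List (String × Int))) × Int :=
  ([[("time_sec", 1)], [("time_sec", 2)], [("time_sec", 10)]], 3)

def Spec_group_events_into_segments_py (events : List (List (String × Int))) (threshold : Int) (out : List (List (List (String × Int)))) : Prop := out = group_events_into_segments_py_alt events threshold
instance (events : List (List (String × Int))) (threshold : Int) (out : List (List (List (String × Int)))) : Decidable (Spec_group_events_into_segments_py events threshold out) := by unfold Spec_group_events_into_segments_py; infer_instance

-- ===== CLAIM (what is proved, stated in full; the proofs are below) =====
def Claim_equal_group_events_into_segments_py : Prop := ∀ (events : List (List (String × Int))) (threshold : Int), Dom_group_events_into_segments_py events threshold → Pre_group_events_into_segments_py events threshold → Spec_group_events_into_segments_py events threshold (group_events_into_segments_py events threshold)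

-- ===== LEMMAS AND PROOFS =====

-- canonical structural grouping, the meeting point of the two ports
def pvGoB (t : Int) : List (List (String × Int)) → List (List (List (String × Int)))
  | [] => []
  | [e] => [[e]]
  | e :: e' :: rest =>
    match pvGoB t (e' :: rest) with
    | [] => [[e]]
    | s :: ss => if pvTime e' - pvTime e > t then [e] :: s :: ss else (e :: s) :: ss

theorem pvGoB_ne_nil (t : Int) (x : List (String × Int)) (xs : List (List (String × Int))) :
    pvGoB t (x :: xs) ≠ [] := by
  induction xs generalizing x with
  | nil => simp [pvGoB]
  | cons y ys ih =>
    simp only [pvGoB]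
    rcases h : pvGoB t (y :: ys) with _ | ⟨s, ss⟩
    · exact absurd h (ih y)
    · split
      · simp
      · split <;> simp

theorem pvLoopA_acc (t : Int) (xs : List (List (String × Int)))
    (segs : List (List (List (String × Int)))) (cur : List (List (String × Int))) :
    pvLoopA t segs cur xs = segs ++ pvLoopA t [] cur xs := by
  induction xs generalizing segs cur with
  | nil => simp [pvLoopA]
  | cons x xs ih =>
    simp only [pvLoopA]
    split
    · rw [ih (segs ++ [cur]), ih ([] ++ [cur])]; simp
    · rw [ih segs, ih []]

theorem pvLoopA_goB (t : Int) (xs : List (List (String × Int)))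
    (pre : List (List (String × Int))) (p : List (String × Int)) :
    pvLoopA t [] (pre ++ [p]) xs = (pvGoB t (p :: xs)).modifyHead (pre ++ ·) := by
  induction xs generalizing pre p with
  | nil => simp [pvLoopA, pvGoB]
  | cons x xs ih =>
    rcases h : pvGoB t (x :: xs) with _ | ⟨s, ss⟩
    · exact absurd h (pvGoB_ne_nil t x xs)
    · simp only [pvLoopA, PySem.List.pyGetD_neg_one_append_singleton, pvGoB, h]
      split
      · rw [pvLoopA_acc]
        have := ih [] x
        simp only [List.nil_append] at this
        rw [this, h]
        simp
      · have := ih (pre ++ [p]) x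
        rw [List.append_assoc] at this
        simp only [this, h, List.modifyHead, List.append_assoc]
        simp

theorem portA_eq_goB (t : Int) (e0 : List (String × Int)) (rest : List (List (String × Int))) :
    pvLoopA t [] [e0] rest = pvGoB t (e0 :: rest) := by
  have := pvLoopA_goB t rest [] e0
  simp only [List.nil_append] at this
  rw [this]
  rcases h : pvGoB t (e0 :: rest) with _ | ⟨s, ss⟩ <;> simp [List.modifyHead]

-- B side: the loop is a left fold
theorem pvLoopB_eq_foldl (t : Int) (ps : List ((List (String × Int)) × (List (String × Int))))
    (segs : List (List (List (String × Int)))) :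
    pvLoopB t segs ps = ps.foldl (pvStepB t) segs := by
  induction ps generalizing segs with
  | nil => rfl
  | cons p ps ih => simp [pvLoopB, ih, List.foldl_cons]

theorem pvAdj_cons (x y : List (String × Int)) (rest : List (List (String × Int))) :
    ((x :: y :: rest).dropLast).zip ((x :: y :: rest).tail)
      = (x, y) :: ((y :: rest).dropLast).zip ((y :: rest).tail) := by
  simp [List.dropLast_cons_of_ne_nil]

theorem pvFoldr_goB (t : Int) (x : List (String × Int)) (xs : List (List (String × Int))) :
    (((x :: xs).dropLast).zip ((x :: xs).tail)).foldr (fun p acc => pvStepB t acc p)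
        [[(x :: xs).getLast (by simp)]]
      = pvGoB t (x :: xs) := by
  induction xs generalizing x with
  | nil => simp [pvGoB]
  | cons y ys ih =>
    rw [pvAdj_cons, List.foldr_cons, List.getLast_cons (by simp), ih y]
    rcases h : pvGoB t (y :: ys) with _ | ⟨s, ss⟩
    · exact absurd h (pvGoB_ne_nil t y ys)
    · simp only [pvGoB, h, pvStepB]

theorem pvZip_reverse {α β : Type} (as : List α) (bs : List β) (h : as.length = bs.length) :
    (as.reverse).zip (bs.reverse) = (as.zip bs).reverse := by
  induction as generalizing bs with
  | nil => simp
  | cons a as ih =>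
    rcases bs with _ | ⟨b, bs⟩
    · simp at h
    · simp only [List.length_cons, Nat.succ.injEq] at h
      rw [List.reverse_cons, List.reverse_cons, List.zip_append (by simp [h]), ih bs h]
      simp

theorem portB_eq_goB (t : Int) (e0 : List (String × Int)) (rest : List (List (String × Int))) :
    pvLoopB t [[PySem.List.pyGetD (e0 :: rest) (-1) []]]
      ((((PySem.List.slice (e0 :: rest) none (some (-1)))).reverse).zip
        ((PySem.List.slice (e0 :: rest) (some 1) none).reverse))
      = pvGoB t (e0 :: rest) := by
  rw [PySem.List.slice_to_neg_one, PySem.List.slice_from_one,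
      PySem.List.pyGetD_neg_one (xs := e0 :: rest) (h := by simp),
      pvZip_reverse _ _ (by simp [List.length_dropLast]),
      pvLoopB_eq_foldl, List.foldl_reverse]
  exact pvFoldr_goB t e0 rest

-- ===== VERDICT (by name: the statement is the Claim_ definition above) =====
theorem group_events_into_segments_py_spec : Claim_equal_group_events_into_segments_py := by
  intro events threshold _ _
  unfold Spec_group_events_into_segments_py
  unfold group_events_into_segments_py group_events_into_segments_py_alt
  by_cases hg : events = [] ∨ threshold ≤ 0
  · simp [hg]
  · rcases events with _ | ⟨e0, rest⟩
    · simp at hg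
    · simp only [if_neg hg]
      rw [portA_eq_goB]
      exact (portB_eq_goB threshold e0 rest).symm
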